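-- pv_equiv track=rewrite | github.com/mikeycurtis/BasketballScorePredictor.github.io | PredictionApp/getLiveHalfStats.py | getPossessions
-- ===== SOURCE A (Python) =====
-- def getPossessions(actions, homeId, awayId):
--     a_POSS = h_POSS = 0
--
--     poss = 0
--     for action in actions:
--         try:
--             if(action['possession'] == poss):
--                 continue
--             else:
--                 poss = action['possession']
--                 if(poss == homeId):
--                     h_POSS += 1
--                 if(poss == awayId):
--                     a_POSS += 1
--         except:
--             continue
--     return a_POSS, h_POSS
-- ===== SOURCE B (Python) =====
-- def getPossessions(actions, homeId, awayId):
--     # Extract possession values in order, skipping actions whose lookup raises.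
--     vals = []
--     for action in actions:
--         try:
--             vals.append(action['possession'])
--         except:
--             pass
--     # A possession change happens exactly where a value differs from its
--     # predecessor in the sequence (with an initial 0 prepended): since A's
--     # 'poss' always equals the previous extracted value, this stateless
--     # pairwise formulation counts the same changes.
--     pairs = list(zip([0] + vals, vals))
--     a_POSS = sum(1 for p, v in pairs if v != p and v == awayId)
--     h_POSS = sum(1 for p, v in pairs if v != p and v == homeId)
--     return a_POSS, h_POSS
-- ===== Notes on version B (the rewrite author's own statement) =====
-- stated objective: alternative
-- what changed: Replaced A's stateful scan (mutable poss accumulator with compare-and-count inside the loop) by a stateless pairwise formulation: zip the extracted possession sequence with itself shifted by one (initial 0 prepended) and count the adjacent unequal pairs per team with two sum comprehensions.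
import Mathlib
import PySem

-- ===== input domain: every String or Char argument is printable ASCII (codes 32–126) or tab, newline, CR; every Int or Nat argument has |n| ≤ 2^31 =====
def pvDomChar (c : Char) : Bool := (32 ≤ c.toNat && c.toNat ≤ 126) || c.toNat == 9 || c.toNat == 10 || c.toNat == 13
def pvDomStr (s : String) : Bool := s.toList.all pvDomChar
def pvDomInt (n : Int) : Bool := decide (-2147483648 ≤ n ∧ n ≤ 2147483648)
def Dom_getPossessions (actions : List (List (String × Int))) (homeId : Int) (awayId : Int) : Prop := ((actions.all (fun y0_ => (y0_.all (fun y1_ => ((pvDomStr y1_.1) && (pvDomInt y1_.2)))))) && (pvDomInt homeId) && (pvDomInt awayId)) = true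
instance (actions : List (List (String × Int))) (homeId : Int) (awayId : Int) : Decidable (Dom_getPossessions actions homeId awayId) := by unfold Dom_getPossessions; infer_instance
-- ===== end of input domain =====

-- B replaces A's stateful compare-and-count scan by a stateless pairwise count over
-- the extracted possession sequence zipped with its shift-by-one (objective: alternative).

-- ===== PORT A =====
-- action['possession'] on an association-list dict: first match, none = KeyError (caught by A's bare except)
def pvLookup (d : List (String × Int)) (k : String) : Option Int :=
  match d with
  | [] => none
  | (k', v) :: r => if k' == k then some v else pvLookup r k

-- A's loop: state (a_POSS, h_POSS, poss); missing key or equal possession → continue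
def getPossessions (actions : List (List (String × Int))) (homeId : Int) (awayId : Int) : Int × Int :=
  let s := actions.foldl (fun (s : Int × Int × Int) action =>
    match pvLookup action "possession" with
    | none => s
    | some v =>
      if v = s.2.2 then s
      else (s.1 + (if v = awayId then 1 else 0), s.2.1 + (if v = homeId then 1 else 0), v))
    (0, 0, 0)
  (s.1, s.2.1)

-- ===== PORT B =====
def getPossessions_alt (actions : List (List (String × Int))) (homeId : Int) (awayId : Int) : Int × Int :=
  let vals := actions.filterMap (fun action => pvLookup action "possession")
  let pairs := List.zip (0 :: vals) vals
  ((pairs.countP (fun pv => pv.2 != pv.1 && pv.2 == awayId) : Int),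
   (pairs.countP (fun pv => pv.2 != pv.1 && pv.2 == homeId) : Int))

-- ===== PRECONDITION & SPEC =====
def Spec_getPossessions (actions : List (List (String × Int))) (homeId : Int) (awayId : Int) (out : Int × Int) : Prop := out = getPossessions_alt actions homeId awayId
instance (actions : List (List (String × Int))) (homeId : Int) (awayId : Int) (out : Int × Int) : Decidable (Spec_getPossessions actions homeId awayId out) := by unfold Spec_getPossessions; infer_instance

-- ===== CLAIM (what is proved, stated in full; the proofs are below) =====
def Claim_equal_getPossessions : Prop := ∀ (actions : List (List (String × Int))) (homeId : Int) (awayId : Int), Dom_getPossessions actions homeId awayId → Spec_getPossessions actions homeId awayId (getPossessions actions homeId awayId)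

-- ===== LEMMAS AND PROOFS =====
-- Invariant: A's fold from state (aP, hP, prev) equals (aP, hP) plus B's pairwise
-- counts over the extracted values zipped with (prev :: extracted values).
theorem pv_fold_eq_paircount (actions : List (List (String × Int))) (homeId awayId : Int)
    (aP hP prev : Int) :
    (let s := actions.foldl (fun (s : Int × Int × Int) action =>
        match pvLookup action "possession" with
        | none => s
        | some v =>
          if v = s.2.2 then s
          else (s.1 + (if v = awayId then 1 else 0), s.2.1 + (if v = homeId then 1 else 0), v))
        (aP, hP, prev)
     (s.1, s.2.1)) =
    (aP + ((List.zip (prev :: actions.filterMap (fun action => pvLookup action "possession"))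
              (actions.filterMap (fun action => pvLookup action "possession"))).countP
              (fun pv => pv.2 != pv.1 && pv.2 == awayId) : Int),
     hP + ((List.zip (prev :: actions.filterMap (fun action => pvLookup action "possession"))
              (actions.filterMap (fun action => pvLookup action "possession"))).countP
              (fun pv => pv.2 != pv.1 && pv.2 == homeId) : Int)) := by
  induction actions generalizing aP hP prev with
  | nil => simp
  | cons a rest ih =>
    simp only [List.foldl_cons, List.filterMap_cons]
    cases h : pvLookup a "possession" with
    | none => simpa [h] using ih aP hP prev
    | some v =>
      simp only [h]
      by_cases hv : v = prev
      · subst hv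
        rw [if_pos rfl, ih aP hP v]
        simp
      · rw [if_neg hv, ih _ _ v]
        have hb : ((v != prev) = true) := by simp [hv]
        simp only [List.zip_cons_cons, List.countP_cons, hb, Bool.true_and, Prod.ext_iff]
        constructor <;> (simp only [beq_iff_eq]; split_ifs <;> push_cast <;> omega)

-- ===== VERDICT (by name: the statement is the Claim_ definition above) =====
theorem getPossessions_spec : Claim_equal_getPossessions := by
  intro actions homeId awayId _
  unfold Spec_getPossessions getPossessions getPossessions_alt
  have := pv_fold_eq_paircount actions homeId awayId 0 0 0
  simpa using this
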